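-- pv_equiv track=rewrite | github.com/xingcdev/efrei-python-graphes | src/points_entree_sortie.py | get_es_uniques
-- ===== SOURCE A (Python) =====
-- CAR_VIDE = None
--
-- def get_es_uniques(mat_adj):
--     # 0 : entrée unique (le cas échéant)
--     # 1 : sortie unique (le cas échéant)
--     e_s_uniques = [None, None]
--
--     # Recherche de sommets sans prédécesseurs
--     for sommet in range(0, len(mat_adj)):
--         if ([col[sommet] for col in mat_adj].count(CAR_VIDE)) == len(mat_adj):
--             # si une entrée a déjà été trouvée : pas d'unicité
--             if e_s_uniques[0] is not None:
--                 e_s_uniques[0] = None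
--                 break
--             # sinon, on la stocke
--             e_s_uniques[0] = sommet
--
--     # Recherche de sommets sans successeurs
--     for sommet in range(0, len(mat_adj)):
--         if mat_adj[sommet].count(CAR_VIDE) == len(mat_adj):
--             # si une sortie a déjà été trouvée : pas d'unicité
--             if e_s_uniques[1] is not None:
--                 e_s_uniques[1] = None
--                 break
--             # sinon, on la stocke
--             e_s_uniques[1] = sommet
--     return e_s_uniques
-- ===== SOURCE B (Python) =====
-- CAR_VIDE = None
--
-- def get_es_uniques(mat_adj):
--     # One row-major sweep: maintain a column-occupancy table and count empty rows
--     # on the fly; columns are never materialised.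
--     n = len(mat_adj)
--     occupied = [False] * n
--     sink_count = 0
--     sink_idx = None
--     for i, row in enumerate(mat_adj):
--         nones = 0
--         for j, v in enumerate(row):
--             if v == CAR_VIDE:
--                 nones += 1
--             elif j < n:
--                 occupied[j] = True
--         if nones == n:
--             sink_count += 1
--             if sink_count == 1:
--                 sink_idx = i
--     source_count = 0
--     source_idx = None
--     for j, occ in enumerate(occupied):
--         if not occ:
--             source_count += 1
--             if source_count == 1:
--                 source_idx = j
--     return [source_idx if source_count == 1 else None,
--             sink_idx if sink_count == 1 else None]
-- ===== Notes on version B (the rewrite author's own statement) =====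
-- stated objective: alternative
-- what changed: A makes two independent passes, extracting each column with an inner comprehension and running a remember-first/nullify-on-second/break state machine; B does one row-major sweep that maintains a column-occupancy table and counts empty rows on the fly (columns are never materialised), then a final scan of the occupancy table decides uniqueness by counting.
-- outside the precondition, e.g. on get_es_uniques([[None, None], [None, None], [None, None]]): A returns [None, None], B returns [None, None]; on get_es_uniques([[1, None], [None, None], [None, None]]): A raises IndexError, B returns [None, None]
import Mathlib
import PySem

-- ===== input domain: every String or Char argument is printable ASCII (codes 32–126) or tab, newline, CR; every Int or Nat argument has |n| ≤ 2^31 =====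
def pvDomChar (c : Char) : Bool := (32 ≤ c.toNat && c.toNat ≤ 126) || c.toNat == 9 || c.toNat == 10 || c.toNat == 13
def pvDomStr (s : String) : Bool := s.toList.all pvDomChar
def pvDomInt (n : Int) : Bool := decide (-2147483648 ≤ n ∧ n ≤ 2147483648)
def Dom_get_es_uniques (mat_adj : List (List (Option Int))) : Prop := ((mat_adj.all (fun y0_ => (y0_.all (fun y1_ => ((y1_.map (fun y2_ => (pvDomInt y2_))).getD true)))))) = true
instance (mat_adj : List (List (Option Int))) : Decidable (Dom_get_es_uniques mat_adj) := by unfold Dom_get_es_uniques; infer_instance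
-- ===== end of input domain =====

-- B replaces A's two column-extracting passes with remember/nullify/break state machines
-- by one row-major sweep maintaining a column-occupancy table plus an empty-row counter,
-- followed by a counting scan of the table (objective: alternative).

-- ===== PORT A =====
-- A's two for-loops have the identical body (remember first hit, nullify and break on a
-- second hit); it is transcribed once, parametrised by the loop's condition.
def pvLoopUnique (p : Int → Bool) : List Int → Option Int → Option Int
  | [], e => e
  | s :: rest, e =>
    if p s then
      match e with
      | some _ => none                     -- second hit: e_s_uniques[k] = None; break
      | none   => pvLoopUnique p rest (some s)
    else pvLoopUnique p rest e

-- '[col[sommet] for col in mat_adj].count(CAR_VIDE) == len(mat_adj)': an out-of-range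
-- col[sommet] (excluded by Pre_) shows up as pyGet? = none ≠ some none.
def pvCondEntree (mat_adj : List (List (Option Int))) (sommet : Int) : Bool :=
  PySem.List.count (mat_adj.map (fun col => PySem.List.pyGet? col sommet)) (some none)
    = mat_adj.length

-- 'mat_adj[sommet].count(CAR_VIDE) == len(mat_adj)' (sommet ∈ range(len) is always in range)
def pvCondSortie (mat_adj : List (List (Option Int))) (sommet : Int) : Bool :=
  PySem.List.count ((PySem.List.pyGet? mat_adj sommet).getD []) none = mat_adj.length

def get_es_uniques (mat_adj : List (List (Option Int))) : List (Option Int) :=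
  let sommets := PySem.List.pyRange 0 (mat_adj.length : Int) 1
  [pvLoopUnique (pvCondEntree mat_adj) sommets none,
   pvLoopUnique (pvCondSortie mat_adj) sommets none]

-- ===== PORT B =====
-- inner loop 'for j, v in enumerate(row): …' over one row: updates occupied, counts Nones
def pvMarkRow (n : Nat) (occ : List Bool) (row : List (Option Int)) : List Bool × Int :=
  (PySem.List.enumerate row 0).foldl
    (fun st jv =>
      if jv.2 == none then (st.1, st.2 + 1)
      else if jv.1 < (n : Int) then (PySem.List.pySetD st.1 jv.1 true, st.2) else st)
    (occ, 0)

def get_es_uniques_alt (mat_adj : List (List (Option Int))) : List (Option Int) :=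
  let n := mat_adj.length
  -- single row-major sweep: occupancy table + sink counter/first index
  let st := (PySem.List.enumerate mat_adj 0).foldl
    (fun (st : List Bool × Int × Option Int) ir =>
      let m := pvMarkRow n st.1 ir.2
      if m.2 == (n : Int) then
        (m.1, st.2.1 + 1, if st.2.1 + 1 == 1 then some ir.1 else st.2.2)
      else (m.1, st.2.1, st.2.2))
    (List.replicate n false, 0, none)
  -- final scan of the occupancy table: count unoccupied columns, keep the first
  let src := (PySem.List.enumerate st.1 0).foldl
    (fun (ac : Int × Option Int) jo =>
      if !jo.2 then
        (ac.1 + 1, if ac.1 + 1 == 1 then some jo.1 else ac.2)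
      else ac)
    (0, none)
  [if src.1 == 1 then src.2 else none, if st.2.1 == 1 then st.2.2 else none]

-- ===== PRECONDITION & SPEC =====
-- Pre_ excludes matrices with a row shorter than the number of rows: there A's column
-- indexing col[sommet] raises IndexError, except when an early break on two previously
-- found empty columns stops the scan before the short position (see cites).
def Pre_get_es_uniques (mat_adj : List (List (Option Int))) : Prop :=
  ∀ row ∈ mat_adj, mat_adj.length ≤ row.length
instance (mat_adj : List (List (Option Int))) : Decidable (Pre_get_es_uniques mat_adj) := by
  unfold Pre_get_es_uniques; infer_instance
def pvWitness_get_es_uniques : List (List (Option Int)) :=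
  [[none, some 1], [none, none]]
def Spec_get_es_uniques (mat_adj : List (List (Option Int))) (out : List (Option Int)) : Prop := out = get_es_uniques_alt mat_adj
instance (mat_adj : List (List (Option Int))) (out : List (Option Int)) : Decidable (Spec_get_es_uniques mat_adj out) := by unfold Spec_get_es_uniques; infer_instance

-- ===== CLAIM (what is proved, stated in full; the proofs are below) =====
def Claim_equal_get_es_uniques : Prop := ∀ (mat_adj : List (List (Option Int))), Dom_get_es_uniques mat_adj → Pre_get_es_uniques mat_adj → Spec_get_es_uniques mat_adj (get_es_uniques mat_adj)

-- ===== LEMMAS AND PROOFS =====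

def pvPick (idxs : List Int) : Option Int :=
  match idxs with
  | [x] => some x
  | _   => none

-- A's loop with the break equals "keep the index iff it is the only hit".
theorem pvLoopUnique_some (p : Int → Bool) (l : List Int) (s0 : Int) :
    pvLoopUnique p l (some s0) = if (l.filter p).isEmpty then some s0 else none := by
  induction l with
  | nil => simp [pvLoopUnique]
  | cons s rest ih =>
    by_cases h : p s <;> simp [pvLoopUnique, h, ih]

theorem pvLoopUnique_eq_pick (p : Int → Bool) (l : List Int) :
    pvLoopUnique p l none = pvPick (l.filter p) := by
  induction l with
  | nil => simp [pvLoopUnique, pvPick]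
  | cons s rest ih =>
    by_cases h : p s
    · cases hf : rest.filter p with
      | nil => simp [pvLoopUnique, h, pvLoopUnique_some, List.filter_cons_of_pos h, hf, pvPick]
      | cons a t => simp [pvLoopUnique, h, pvLoopUnique_some, List.filter_cons_of_pos h, hf, pvPick]
    · simp [pvLoopUnique, h, List.filter_cons_of_neg h, ih]

-- The entry condition is 'every row yields some none at this index'.
theorem cond_entree_eq (mat_adj : List (List (Option Int))) (j : Int) :
    pvCondEntree mat_adj j
      = mat_adj.all (fun row => PySem.List.pyGet? row j == some none) := by
  have hlen : (mat_adj.map (fun col => PySem.List.pyGet? col j)).length = mat_adj.length :=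
    List.length_map ..
  by_cases hall : ∀ row ∈ mat_adj, PySem.List.pyGet? row j = some none
  · have h1 : List.count (some none) (mat_adj.map (fun col => PySem.List.pyGet? col j))
        = (mat_adj.map (fun col => PySem.List.pyGet? col j)).length := by
      rw [List.count_eq_length]
      intro b hb
      obtain ⟨row, hr, rfl⟩ := List.mem_map.mp hb
      exact (hall row hr).symm
    simp [pvCondEntree, PySem.List.count_eq, h1, hlen, List.all_eq_true]
    exact hall
  · have h1 : List.count (some none) (mat_adj.map (fun col => PySem.List.pyGet? col j))
        ≠ mat_adj.length := by
      rw [← hlen]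
      intro hc
      exact hall (fun row hr => ((List.count_eq_length.mp hc) _ (List.mem_map_of_mem hr)).symm)
    push Not at hall
    obtain ⟨row, hr, hne⟩ := hall
    have hB : mat_adj.all (fun row => PySem.List.pyGet? row j == some none) = false := by
      simp only [List.all_eq_false]
      exact ⟨row, hr, by simpa using hne⟩
    simp [pvCondEntree, PySem.List.count_eq, hB, h1]

-- the 'count the hits, keep the first hit's index' loop body, shared by both of B's counters
def pvCnt {β : Type} (p : β → Bool) (f : β → Int) : (Int × Option Int) → β → (Int × Option Int) :=
  fun ac x => if p x then (ac.1 + 1, if ac.1 + 1 == 1 then some (f x) else ac.2) else ac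

-- counter fold, counter already positive: the stored index never changes
theorem counterFold_pos {β : Type} (p : β → Bool) (f : β → Int) (l : List β)
    (c : Int) (hc : 1 ≤ c) (idx : Option Int) :
    l.foldl (pvCnt p f) (c, idx) = (c + (l.countP p : Int), idx) := by
  induction l generalizing c idx with
  | nil => simp
  | cons x rest ih =>
    by_cases h : p x
    · have h1 : (c + 1 == 1) = false := by simp; omega
      rw [List.foldl_cons, show pvCnt p f (c, idx) x = (c + 1, idx) by simp [pvCnt, h, h1],
        ih (c + 1) (by omega) idx, List.countP_cons]
      simp [h]; omega
    · rw [List.foldl_cons, show pvCnt p f (c, idx) x = (c, idx) by simp [pvCnt, h],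
        ih c hc idx, List.countP_cons]
      simp [h]

-- counter fold from zero: count of hits plus the first hit's index
theorem counterFold_zero {β : Type} (p : β → Bool) (f : β → Int) (l : List β) (idx : Option Int) :
    l.foldl (pvCnt p f) (0, idx)
      = ((l.countP p : Int),
         match (l.filter p).head? with | none => idx | some x => some (f x)) := by
  induction l with
  | nil => simp
  | cons x rest ih =>
    by_cases h : p x
    · rw [List.foldl_cons, show pvCnt p f (0, idx) x = (1, some (f x)) by simp [pvCnt, h],
        counterFold_pos p f rest 1 (by omega) (some (f x)), List.countP_cons,
        List.filter_cons_of_pos h]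
      simp [h]; omega
    · rw [List.foldl_cons, show pvCnt p f (0, idx) x = (0, idx) by simp [pvCnt, h], ih,
        List.countP_cons, List.filter_cons_of_neg h]
      simp [h]

-- 'row[k] is present and not None' — whether position k of a row blocks column k
def pvHit (row : List (Option Int)) (k : Nat) : Bool :=
  match row[k]? with
  | some v => v != none
  | none => false

-- the inner loop's body of pvMarkRow, named so the lemmas can mention it
def pvMarkF (n : Nat) : (List Bool × Int) → (Int × Option Int) → (List Bool × Int) :=
  fun st jv =>
    if jv.2 == none then (st.1, st.2 + 1)
    else if jv.1 < (n : Int) then (PySem.List.pySetD st.1 jv.1 true, st.2) else st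

theorem markRow_def (n : Nat) (occ : List Bool) (row : List (Option Int)) :
    pvMarkRow n occ row = (PySem.List.enumerate row 0).foldl (pvMarkF n) (occ, 0) := rfl

theorem markF_snd (n : Nat) (row : List (Option Int)) :
    ∀ (s : Int) (occ : List Bool) (c : Int),
      ((PySem.List.enumerate row s).foldl (pvMarkF n) (occ, c)).2
        = c + (row.count none : Int) := by
  induction row with
  | nil => intro s occ c; simp [PySem.List.enumerate_nil]
  | cons v rest ih =>
    intro s occ c
    rw [PySem.List.enumerate_cons, List.foldl_cons]
    by_cases hv : v == none
    · rw [show pvMarkF n (occ, c) (s, v) = (occ, c + 1) by simp [pvMarkF, hv],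
        ih (s + 1) occ (c + 1), List.count_cons]
      simp [hv]; ring
    · by_cases hs : (s : Int) < (n : Int)
      · rw [show pvMarkF n (occ, c) (s, v) = (PySem.List.pySetD occ s true, c) by
          simp [pvMarkF, hv, hs], ih (s + 1) _ c, List.count_cons]
        simp [hv]
      · rw [show pvMarkF n (occ, c) (s, v) = (occ, c) by simp [pvMarkF, hv, hs],
          ih (s + 1) occ c, List.count_cons]
        simp [hv]

theorem pvHit_cons_shift (v : Option Int) (rest : List (Option Int)) (s j : Nat)
    (h : s < j) : pvHit (v :: rest) (j - s) = pvHit rest (j - (s + 1)) := by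
  have hj : j - s = (j - (s + 1)) + 1 := by omega
  rw [hj]
  simp [pvHit]

theorem markF_fst_get (n : Nat) (row : List (Option Int)) :
    ∀ (s : Nat) (occ : List Bool) (c : Int) (j : Nat),
      ((PySem.List.enumerate row (s : Int)).foldl (pvMarkF n) (occ, c)).1[j]?
        = occ[j]?.map
            (fun b => b || (decide (s ≤ j) && decide (j < n) && pvHit row (j - s))) := by
  induction row with
  | nil =>
    intro s occ c j
    show occ[j]? = _
    cases occ[j]? <;> simp [pvHit]
  | cons v rest ih =>
    intro s occ c j
    rw [PySem.List.enumerate_cons, List.foldl_cons,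
      show ((s : Int) + 1) = (((s + 1 : Nat)) : Int) by push_cast; ring]
    by_cases hv : v == none
    · rw [show pvMarkF n (occ, c) ((s : Int), v) = (occ, c + 1) by simp [pvMarkF, hv],
        ih (s + 1) occ (c + 1) j]
      have hveq : v = none := by simpa using hv
      cases occ[j]? with
      | none => rfl
      | some b =>
        simp only [Option.map_some]
        congr 1
        rcases Nat.lt_trichotomy j s with hc | hc | hc
        · simp [Nat.not_le_of_lt hc, Nat.not_le_of_lt (Nat.lt_succ_of_lt hc)]
        · subst hc
          simp [hveq, pvHit]
        · rw [pvHit_cons_shift v rest s j hc]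
          simp [Nat.le_of_lt hc, Nat.succ_le_of_lt hc]
    · by_cases hs : ((s : Nat) : Int) < (n : Int)
      · have hsn : s < n := by exact_mod_cast hs
        rw [show pvMarkF n (occ, c) ((s : Int), v) = (occ.set s true, c) by
          simp [pvMarkF, hv, hs], ih (s + 1) _ c j]
        by_cases hj : j = s
        · subst hj
          rw [List.getElem?_set, if_pos rfl]
          by_cases hl : j < occ.length
          · rw [if_pos hl]
            cases hocc : occ[j]? with
            | none => exact absurd (List.getElem?_eq_getElem hl) (by simp [hocc])
            | some b =>
              simp only [Option.map_some]
              have hvne : (v != none) = true := by simpa using hv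
              simp [hsn, pvHit, hvne]
          · rw [if_neg hl]
            rw [List.getElem?_eq_none_iff.mpr (by omega)]
            rfl
        · rw [List.getElem?_set, if_neg (fun hx => hj hx.symm)]
          cases occ[j]? with
          | none => rfl
          | some b =>
            simp only [Option.map_some]
            congr 1
            rcases Nat.lt_trichotomy j s with hc | hc | hc
            · simp [Nat.not_le_of_lt hc, Nat.not_le_of_lt (Nat.lt_succ_of_lt hc)]
            · exact absurd hc hj
            · rw [pvHit_cons_shift v rest s j hc]
              simp [Nat.le_of_lt hc, Nat.succ_le_of_lt hc]
      · rw [show pvMarkF n (occ, c) ((s : Int), v) = (occ, c) by simp [pvMarkF, hv, hs],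
          ih (s + 1) occ c j]
        have hsn : ¬ s < n := fun hx => hs (by exact_mod_cast hx)
        cases occ[j]? with
        | none => rfl
        | some b =>
          simp only [Option.map_some]
          congr 1
          rcases Nat.lt_trichotomy j s with hc | hc | hc
          · simp [Nat.not_le_of_lt hc, Nat.not_le_of_lt (Nat.lt_succ_of_lt hc)]
          · subst hc
            simp [hsn]
          · rw [pvHit_cons_shift v rest s j hc]
            simp [Nat.le_of_lt hc, Nat.succ_le_of_lt hc]

theorem markRow_fst_get (n : Nat) (occ : List Bool) (row : List (Option Int)) (j : Nat) :
    (pvMarkRow n occ row).1[j]?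
      = occ[j]?.map (fun b => b || (decide (j < n) && pvHit row j)) := by
  have h := markF_fst_get n row 0 occ 0 j
  rw [Nat.cast_zero] at h
  rw [markRow_def, h]
  simp

theorem markRow_snd (n : Nat) (occ : List Bool) (row : List (Option Int)) :
    (pvMarkRow n occ row).2 = (row.count none : Int) := by
  rw [markRow_def, markF_snd n row 0 occ 0, zero_add]

-- the row sweep's effect on the occupancy table alone
def pvOccF (n : Nat) : List Bool → List (Option Int) → List Bool :=
  fun o row => (pvMarkRow n o row).1

theorem occFold_get (n : Nat) (rows : List (List (Option Int))) :
    ∀ (occ : List Bool) (j : Nat),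
      (rows.foldl (pvOccF n) occ)[j]?
        = occ[j]?.map
            (fun b => b || rows.any (fun row => decide (j < n) && pvHit row j)) := by
  induction rows with
  | nil =>
    intro occ j
    show occ[j]? = _
    cases occ[j]? <;> simp
  | cons r rs ih =>
    intro occ j
    rw [List.foldl_cons, ih (pvOccF n occ r) j, pvOccF, markRow_fst_get, Option.map_map]
    cases occ[j]? with
    | none => rfl
    | some b => simp [Bool.or_assoc]

theorem markF_len (n : Nat) (l : List (Int × Option Int)) :
    ∀ (occ : List Bool) (c : Int), ((l.foldl (pvMarkF n) (occ, c)).1).length = occ.length := by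
  induction l with
  | nil => intro occ c; rfl
  | cons x xs ih =>
    intro occ c
    rw [List.foldl_cons]
    by_cases hv : x.2 == none
    · rw [show pvMarkF n (occ, c) x = (occ, c + 1) by simp [pvMarkF, hv]]
      exact ih occ (c + 1)
    · by_cases hs : x.1 < (n : Int)
      · rw [show pvMarkF n (occ, c) x = (PySem.List.pySetD occ x.1 true, c) by
          simp [pvMarkF, hv, hs], ih _ c]
        simp [PySem.List.length_pySetD]
      · rw [show pvMarkF n (occ, c) x = (occ, c) by simp [pvMarkF, hv, hs]]
        exact ih occ c

theorem occFold_len (n : Nat) (rows : List (List (Option Int))) (occ : List Bool) :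
    (rows.foldl (pvOccF n) occ).length = occ.length := by
  induction rows generalizing occ with
  | nil => rfl
  | cons r rs ih =>
    rw [List.foldl_cons, ih, pvOccF, markRow_def, markF_len]

-- the sink test of the sweep, as a predicate on an enumerated row
def pvSinkP (n : Nat) : (Int × List (Option Int)) → Bool :=
  fun ir => ((ir.2.count none : Int) == (n : Int))

-- the row sweep's loop body
def pvSweepF (n : Nat) :
    (List Bool × Int × Option Int) → (Int × List (Option Int)) → (List Bool × Int × Option Int) :=
  fun st ir =>
    let m := pvMarkRow n st.1 ir.2
    if m.2 == (n : Int) then (m.1, st.2.1 + 1, if st.2.1 + 1 == 1 then some ir.1 else st.2.2)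
    else (m.1, st.2.1, st.2.2)

-- the sweep splits into the occupancy fold and the sink counter fold
theorem sweep_eq (n : Nat) (l : List (Int × List (Option Int))) :
    ∀ (occ : List Bool) (c : Int) (idx : Option Int),
      l.foldl (pvSweepF n) (occ, c, idx)
        = ((l.map (·.2)).foldl (pvOccF n) occ,
           l.foldl (pvCnt (pvSinkP n) (·.1)) (c, idx)) := by
  induction l with
  | nil => intro occ c idx; rfl
  | cons x xs ih =>
    intro occ c idx
    rw [List.foldl_cons, List.map_cons, List.foldl_cons, List.foldl_cons]
    by_cases hp : pvSinkP n x
    · rw [show pvSweepF n (occ, c, idx) x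
          = (pvOccF n occ x.2, c + 1, if c + 1 == 1 then some x.1 else idx) by
        simp only [pvSweepF, markRow_snd, pvOccF]
        rw [if_pos (by simpa [pvSinkP] using hp)],
        show pvCnt (pvSinkP n) (·.1) (c, idx) x
          = (c + 1, if c + 1 == 1 then some x.1 else idx) by simp [pvCnt, hp]]
      exact ih _ _ _
    · rw [show pvSweepF n (occ, c, idx) x = (pvOccF n occ x.2, c, idx) by
        simp only [pvSweepF, markRow_snd, pvOccF]
        rw [if_neg (by simpa [pvSinkP] using hp)],
        show pvCnt (pvSinkP n) (·.1) (c, idx) x = (c, idx) by simp [pvCnt, hp]]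
      exact ih _ _ _

-- B's definition, with its two folds named
theorem alt_eq (mat_adj : List (List (Option Int))) :
    get_es_uniques_alt mat_adj =
      (let n := mat_adj.length
       let st := (PySem.List.enumerate mat_adj 0).foldl (pvSweepF n)
         (List.replicate n false, 0, none)
       let src := (PySem.List.enumerate st.1 0).foldl
         (pvCnt (fun jo : Int × Bool => !jo.2) (·.1)) (0, none)
       [if src.1 == 1 then src.2 else none, if st.2.1 == 1 then st.2.2 else none]) := rfl

-- 'exactly one hit: its index, else None' in counter form
theorem pick_count (L : List Int) :
    (if ((L.length : Int) == 1) then L.head? else none) = pvPick L := by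
  match L with
  | [] => simp [pvPick]
  | [x] => simp [pvPick]
  | x :: y :: t =>
    rw [if_neg (by simp; omega)]
    rfl

-- counter fold from zero with no stored index: count plus the first hit
theorem counterFold_zero_none {β : Type} (p : β → Bool) (f : β → Int) (l : List β) :
    l.foldl (pvCnt p f) (0, none)
      = ((l.countP p : Int), (l.filter p).head?.map f) := by
  rw [counterFold_zero]
  cases (l.filter p).head? <;> rfl

-- ===== VERDICT (by name: the statement is the Claim_ definition above) =====
theorem get_es_uniques_spec : Claim_equal_get_es_uniques := by
  intro mat _ hpre
  unfold Spec_get_es_uniques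
  simp only [get_es_uniques, alt_eq, sweep_eq, PySem.List.map_snd_enumerate,
    counterFold_zero_none]
  refine List.cons_eq_cons.mpr ⟨?_, List.cons_eq_cons.mpr ⟨?_, rfl⟩⟩
  · -- sources: the occupancy-table scan equals A's first loop
    set OCC := mat.foldl (pvOccF mat.length) (List.replicate mat.length false) with hOCC
    have hOCClen : OCC.length = mat.length := by
      rw [hOCC, occFold_len, List.length_replicate]
    have hEnum2 := PySem.List.enumerate_eq_map_pyRange (xs := OCC) (d := false)
    rw [PySem.List.len_eq, hOCClen] at hEnum2
    have hq2 : ∀ j ∈ PySem.List.pyRange 0 (mat.length : Int) 1,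
        ((fun jo : Int × Bool => !jo.2) ∘ fun j => (j, PySem.List.pyGetD OCC j false)) j
          = pvCondEntree mat j := by
      intro j hj
      obtain ⟨hj0, hjlt⟩ := (PySem.List.mem_pyRange_one).mp hj
      have hk : j.toNat < mat.length := by omega
      have hkO : j.toNat < OCC.length := by omega
      simp only [Function.comp_apply]
      rw [PySem.List.pyGetD_eq_getElem OCC false hj0 (by rw [hOCClen]; exact hjlt)]
      have hval : OCC[j.toNat] = mat.any (fun row => pvHit row j.toNat) := by
        have h1 := occFold_get mat.length mat (List.replicate mat.length false) j.toNat
        rw [List.getElem?_replicate, if_pos hk, ← hOCC,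
          List.getElem?_eq_getElem hkO] at h1
        have h2 := Option.some.inj h1
        rw [h2]
        simp [hk]
      rw [hval, cond_entree_eq, List.any_eq_not_all_not, Bool.not_not]
      have hrow : ∀ row ∈ mat,
          (!pvHit row j.toNat) = (PySem.List.pyGet? row j == some none) := by
        intro row hrw
        have hrl : mat.length ≤ row.length := hpre row hrw
        have hk2 : j.toNat < row.length := by omega
        rw [PySem.List.pyGet?_eq_some_getElem row hj0 (by omega)]
        simp only [pvHit, List.getElem?_eq_getElem hk2]
        cases hv : row[j.toNat] <;> simp
      rw [Bool.eq_iff_iff]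
      simp only [List.all_eq_true]
      exact ⟨fun h r hr => by rw [← hrow r hr]; exact h r hr,
        fun h r hr => by rw [hrow r hr]; exact h r hr⟩
    rw [hEnum2, List.countP_map, List.filter_map, List.head?_map,
      List.countP_eq_length_filter, List.filter_congr hq2, Option.map_map,
      pvLoopUnique_eq_pick]
    have hid : ((fun jo : Int × Bool => jo.1) ∘ fun j => (j, PySem.List.pyGetD OCC j false))
        = fun j => j := rfl
    rw [hid]
    generalize (PySem.List.pyRange 0 (mat.length : Int) 1).filter (pvCondEntree mat) = L
    rw [show L.head?.map (fun j => j) = L.head? from by cases L.head? <;> rfl]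
    exact (pick_count L).symm
  · -- sinks: the row counter equals A's second loop
    have hEnum := PySem.List.enumerate_eq_map_pyRange
      (xs := mat) (d := ([] : List (Option Int)))
    rw [PySem.List.len_eq] at hEnum
    have hq : ∀ j ∈ PySem.List.pyRange 0 (mat.length : Int) 1,
        (pvSinkP mat.length ∘ fun j => (j, PySem.List.pyGetD mat j [])) j
          = pvCondSortie mat j := by
      intro j hj
      obtain ⟨hj0, hjlt⟩ := (PySem.List.mem_pyRange_one).mp hj
      have hk : j.toNat < mat.length := by omega
      simp only [Function.comp_apply, pvSinkP]
      unfold pvCondSortie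
      rw [PySem.List.pyGet?_eq_some_getElem mat hj0 hjlt, Option.getD_some,
        PySem.List.pyGetD_eq_getElem mat [] hj0 hjlt, PySem.List.count_eq]
      by_cases hc : mat[j.toNat].count none = mat.length
      · simp [hc]
      · have hc' : ¬ ((mat[j.toNat].count none : Int) = (mat.length : Int)) := by
          exact_mod_cast hc
        simp [hc, hc']
    rw [hEnum, List.countP_map, List.filter_map, List.head?_map,
      List.countP_eq_length_filter, List.filter_congr hq, Option.map_map,
      pvLoopUnique_eq_pick]
    have hid : ((fun ir : Int × List (Option Int) => ir.1)
        ∘ fun j => (j, PySem.List.pyGetD mat j [])) = fun j => j := rfl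
    rw [hid]
    generalize (PySem.List.pyRange 0 (mat.length : Int) 1).filter (pvCondSortie mat) = L
    rw [show L.head?.map (fun j => j) = L.head? from by cases L.head? <;> rfl]
    exact (pick_count L).symm
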